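-- pv_equiv track=rewrite | github.com/sandro20450/bichos-app | app_duque.py | gerar_bolinhas_recentes_duque
-- ===== SOURCE A (Python) =====
-- def gerar_universo_duques():
--     todos = []
--     for i in range(1, 26):
--         for j in range(i, 26): todos.append((i, j))
--     setor1 = [d for k, d in enumerate(todos) if k % 3 == 0]
--     setor2 = [d for k, d in enumerate(todos) if k % 3 == 1]
--     setor3 = [d for k, d in enumerate(todos) if k % 3 == 2]
--     return todos, {"SETOR 1 (S1)": setor1, "SETOR 2 (S2)": setor2, "SETOR 3 (S3)": setor3}
--
-- def gerar_bolinhas_recentes_duque(historico):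
--     _, mapa = gerar_universo_duques()
--     html = "<div>"
--     for duque in reversed(historico[-12:]):
--         duque_sorted = tuple(sorted(duque))
--         classe = ""
--         letra = ""
--         if duque_sorted in mapa["SETOR 1 (S1)"]: classe = "bola-s1"; letra = "S1"
--         elif duque_sorted in mapa["SETOR 2 (S2)"]: classe = "bola-s2"; letra = "S2"
--         elif duque_sorted in mapa["SETOR 3 (S3)"]: classe = "bola-s3"; letra = "S3"
--         else: classe = "bola-s1"; letra = "?"
--         html += f"<div class='{classe}'>{letra}</div>"
--     html += "</div>"
--     return html
-- ===== SOURCE B (Python) =====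
-- def gerar_bolinhas_recentes_duque(historico):
--     # Same output as A, but the sector of a pair is computed directly from its
--     # position k = (i-1)*26 - (i-1)*i//2 + (j-i) in the triangular universe
--     # (sector = k % 3); no universe list / sector tables are built at all.
--     partes = ["<div>"]
--     for a, b in reversed(historico[-12:]):
--         i, j = min(a, b), max(a, b)
--         if 1 <= i and j <= 25:
--             k = (i - 1) * 26 - (i - 1) * i // 2 + (j - i)
--             r = k % 3
--             if r == 0:
--                 classe, letra = "bola-s1", "S1"
--             elif r == 1:
--                 classe, letra = "bola-s2", "S2"
--             else:
--                 classe, letra = "bola-s3", "S3"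
--         else:
--             classe, letra = "bola-s1", "?"
--         partes.append("<div class='" + classe + "'>" + letra + "</div>")
--     partes.append("</div>")
--     return "".join(partes)
-- ===== Notes on version B (the rewrite author's own statement) =====
-- stated objective: alternative
-- what changed: B drops the 325-pair universe list and the three sector tables with their linear membership scans, classifying each pair arithmetically from its triangular-number index k=(i-1)*26-(i-1)*i//2+(j-i) with sector k%3, and joins the badge strings instead of repeated string concatenation.
import Mathlib
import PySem

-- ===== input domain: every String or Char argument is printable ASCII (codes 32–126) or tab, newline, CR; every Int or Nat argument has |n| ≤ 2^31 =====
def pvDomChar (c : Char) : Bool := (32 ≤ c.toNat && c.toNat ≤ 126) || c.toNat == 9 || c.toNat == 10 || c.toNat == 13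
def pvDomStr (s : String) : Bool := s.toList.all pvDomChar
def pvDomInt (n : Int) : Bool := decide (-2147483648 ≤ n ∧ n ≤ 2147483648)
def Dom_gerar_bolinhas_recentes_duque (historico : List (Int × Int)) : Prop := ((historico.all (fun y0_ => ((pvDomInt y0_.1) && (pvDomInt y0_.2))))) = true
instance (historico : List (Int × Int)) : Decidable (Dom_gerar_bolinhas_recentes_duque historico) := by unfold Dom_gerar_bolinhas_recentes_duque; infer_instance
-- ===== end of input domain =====

-- B classifies each pair arithmetically from its triangular index (sector = k % 3) and joins the
-- badge strings, instead of building the 325-pair universe plus three sector tables and scanning them.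

-- ===== PORT A =====
def gerar_universo_duques : List (Int × Int) × PySem.Dict String (List (Int × Int)) :=
  let todos := (PySem.List.pyRange 1 26 1).foldl
    (fun todos i => (PySem.List.pyRange i 26 1).foldl (fun todos j => todos ++ [(i, j)]) todos) []
  let setor1 := ((PySem.List.enumerate todos).filter (fun kd => PySem.Int.mod kd.1 3 == 0)).map (·.2)
  let setor2 := ((PySem.List.enumerate todos).filter (fun kd => PySem.Int.mod kd.1 3 == 1)).map (·.2)
  let setor3 := ((PySem.List.enumerate todos).filter (fun kd => PySem.Int.mod kd.1 3 == 2)).map (·.2)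
  (todos, PySem.Dict.ofList
    [("SETOR 1 (S1)", setor1), ("SETOR 2 (S2)", setor2), ("SETOR 3 (S3)", setor3)])

def gerar_bolinhas_recentes_duque (historico : List (Int × Int)) : String :=
  let mapa := gerar_universo_duques.2
  -- mapa["…"]: the three keys are always present, so getD with a dummy default is exact
  ((PySem.List.slice historico (some (-12)) none).reverse).foldl
    (fun html duque =>
      -- tuple(sorted(duque)) of a 2-tuple: the smaller component first (exact for ints)
      let ds : Int × Int := if duque.1 ≤ duque.2 then (duque.1, duque.2) else (duque.2, duque.1)
      let cl : String × String :=
        if (PySem.Dict.getD mapa "SETOR 1 (S1)" []).contains ds then ("bola-s1", "S1")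
        else if (PySem.Dict.getD mapa "SETOR 2 (S2)" []).contains ds then ("bola-s2", "S2")
        else if (PySem.Dict.getD mapa "SETOR 3 (S3)" []).contains ds then ("bola-s3", "S3")
        else ("bola-s1", "?")
      html ++ ("<div class='" ++ cl.1 ++ "'>" ++ cl.2 ++ "</div>")) "<div>"
    ++ "</div>"

-- ===== PORT B =====
def gerar_bolinhas_recentes_duque_alt (historico : List (Int × Int)) : String :=
  let partes := ((PySem.List.slice historico (some (-12)) none).reverse).foldl
    (fun partes d =>
      let i := min d.1 d.2
      let j := max d.1 d.2
      let cl : String × String :=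
        if 1 ≤ i ∧ j ≤ 25 then
          let k := (i - 1) * 26 - PySem.Int.floordiv ((i - 1) * i) 2 + (j - i)
          let r := PySem.Int.mod k 3
          if r == 0 then ("bola-s1", "S1")
          else if r == 1 then ("bola-s2", "S2")
          else ("bola-s3", "S3")
        else ("bola-s1", "?")
      partes ++ ["<div class='" ++ cl.1 ++ "'>" ++ cl.2 ++ "</div>"]) ["<div>"]
  PySem.Str.join "" (partes ++ ["</div>"])

-- ===== PRECONDITION & SPEC =====
def Spec_gerar_bolinhas_recentes_duque (historico : List (Int × Int)) (out : String) : Prop := out = gerar_bolinhas_recentes_duque_alt historico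
instance (historico : List (Int × Int)) (out : String) : Decidable (Spec_gerar_bolinhas_recentes_duque historico out) := by unfold Spec_gerar_bolinhas_recentes_duque; infer_instance

-- ===== CLAIM (what is proved, stated in full; the proofs are below) =====
def Claim_equal_gerar_bolinhas_recentes_duque : Prop := ∀ (historico : List (Int × Int)), Dom_gerar_bolinhas_recentes_duque historico → Spec_gerar_bolinhas_recentes_duque historico (gerar_bolinhas_recentes_duque historico)

-- ===== LEMMAS AND PROOFS =====

-- the three sector lists A builds, as literals (checked by `decide`)
def pvS1Lit : List (Int × Int) := [(1, 1), (1, 4), (1, 7), (1, 10), (1, 13), (1, 16), (1, 19), (1, 22), (1, 25), (2, 4), (2, 7), (2, 10), (2, 13), (2, 16), (2, 19), (2, 22), (2, 25), (3, 5), (3, 8), (3, 11), (3, 14), (3, 17), (3, 20), (3, 23), (4, 4), (4, 7), (4, 10), (4, 13), (4, 16), (4, 19), (4, 22), (4, 25), (5, 7), (5, 10), (5, 13), (5, 16), (5, 19), (5, 22), (5, 25), (6, 8), (6, 11), (6, 14), (6, 17), (6, 20), (6, 23), (7, 7), (7, 10), (7, 13), (7, 16), (7, 19), (7, 22), (7,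 25), (8, 10), (8, 13), (8, 16), (8, 19), (8, 22), (8, 25), (9, 11), (9, 14), (9, 17), (9, 20), (9, 23), (10, 10), (10, 13), (10, 16), (10, 19), (10, 22), (10, 25), (11, 13), (11, 16), (11, 19), (11, 22), (11, 25), (12, 14), (12, 17), (12, 20), (12, 23), (13, 13), (13, 16), (13, 19), (13, 22), (13, 25), (14, 16), (14, 19), (14, 22), (14, 25), (15, 17), (15, 20), (15, 23), (16, 16), (16, 19), (16, 22), (16, 25), (17, 19), (17, 22), (17, 25), (18, 20), (18, 23), (19, 19), (19, 22), (19, 25), (20, 22), (20, 25), (21, 23), (22, 22), (22, 25), (23, 25), (25, 25)]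

def pvS2Lit : List (Int × Int) := [(1, 2), (1, 5), (1, 8), (1, 11), (1, 14), (1, 17), (1, 20), (1, 23), (2, 2), (2, 5), (2, 8), (2, 11), (2, 14), (2, 17), (2, 20), (2, 23), (3, 3), (3, 6), (3, 9), (3, 12), (3, 15), (3, 18), (3, 21), (3, 24), (4, 5), (4, 8), (4, 11), (4, 14), (4, 17), (4, 20), (4, 23), (5, 5), (5, 8), (5, 11), (5, 14), (5, 17), (5, 20), (5, 23), (6, 6), (6, 9), (6, 12), (6, 15), (6, 18), (6, 21), (6, 24), (7, 8), (7, 11), (7, 14), (7, 17), (7, 20), (7, 23), (8, 8), (8, 11), (8, 14), (8, 17), (8, 20), (8, 23), (9, 9), (9, 12), (9, 15), (9, 18), (9, 21), (9, 24), (10, 11), (10, 14), (10, 17), (10, 20), (10, 23), (11, 11), (11, 14), (11, 17), (11, 20), (11, 23), (12, 12), (12, 15), (12, 18), (12, 21), (12, 24), (13, 14), (13, 17), (13, 20), (13, 23), (14, 14), (14, 17), (14, 20), (14, 23), (15, 15), (15, 18), (15, 21), (15, 24), (16, 17), (16, 20), (16, 23), (17, 17), (17, 20), (17, 23), (18, 18),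 (18, 21), (18, 24), (19, 20), (19, 23), (20, 20), (20, 23), (21, 21), (21, 24), (22, 23), (23, 23), (24, 24)]

def pvS3Lit : List (Int × Int) := [(1, 3), (1, 6), (1, 9), (1, 12), (1, 15), (1, 18), (1, 21), (1, 24), (2, 3), (2, 6), (2, 9), (2, 12), (2, 15), (2, 18), (2, 21), (2, 24), (3, 4), (3, 7), (3, 10), (3, 13), (3, 16), (3, 19), (3, 22), (3, 25), (4, 6), (4, 9), (4, 12), (4, 15), (4, 18), (4, 21), (4, 24), (5, 6), (5, 9), (5, 12), (5, 15), (5, 18), (5, 21), (5, 24), (6, 7), (6, 10), (6, 13), (6, 16), (6, 19), (6, 22), (6, 25), (7, 9), (7, 12), (7, 15), (7, 18), (7, 21), (7, 24), (8, 9), (8, 12), (8, 15), (8, 18), (8, 21), (8, 24), (9, 10), (9, 13), (9, 16), (9, 19), (9, 22), (9, 25), (10, 12), (10, 15), (10, 18), (10, 21), (10, 24), (11, 12), (11, 15), (11, 18), (11, 21), (11, 24), (12, 13), (12, 16), (12, 19), (12, 22), (12, 25), (13, 15), (13, 18), (13, 21), (13, 24), (14, 15), (14, 18), (14, 21), (14,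 24), (15, 16), (15, 19), (15, 22), (15, 25), (16, 18), (16, 21), (16, 24), (17, 18), (17, 21), (17, 24), (18, 19), (18, 22), (18, 25), (19, 21), (19, 24), (20, 21), (20, 24), (21, 22), (21, 25), (22, 24), (23, 24), (24, 25)]

set_option maxRecDepth 10000 in
lemma pvMapa1 : PySem.Dict.getD gerar_universo_duques.2 "SETOR 1 (S1)" [] = pvS1Lit := by decide
set_option maxRecDepth 10000 in
lemma pvMapa2 : PySem.Dict.getD gerar_universo_duques.2 "SETOR 2 (S2)" [] = pvS2Lit := by decide
set_option maxRecDepth 10000 in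
lemma pvMapa3 : PySem.Dict.getD gerar_universo_duques.2 "SETOR 3 (S3)" [] = pvS3Lit := by decide

lemma pvS1Bound : ∀ p ∈ pvS1Lit, 1 ≤ p.1 ∧ p.2 ≤ 25 := by decide
lemma pvS2Bound : ∀ p ∈ pvS2Lit, 1 ≤ p.1 ∧ p.2 ≤ 25 := by decide
lemma pvS3Bound : ∀ p ∈ pvS3Lit, 1 ≤ p.1 ∧ p.2 ≤ 25 := by decide

-- the in-range classification agrees with the arithmetic one (finite check)
set_option maxHeartbeats 2000000 in
lemma pvInRange : ∀ i ∈ Finset.Icc (1 : Int) 25, ∀ j ∈ Finset.Icc i 25,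
    (if pvS1Lit.contains (i, j) then (("bola-s1", "S1") : String × String)
     else if pvS2Lit.contains (i, j) then ("bola-s2", "S2")
     else if pvS3Lit.contains (i, j) then ("bola-s3", "S3")
     else ("bola-s1", "?"))
  = (let k := (i - 1) * 26 - PySem.Int.floordiv ((i - 1) * i) 2 + (j - i)
     let r := PySem.Int.mod k 3
     if r == 0 then ("bola-s1", "S1")
     else if r == 1 then ("bola-s2", "S2")
     else ("bola-s3", "S3")) := by decide

lemma pvClassEqCore (i j : Int) (hij : i ≤ j) :
    (if pvS1Lit.contains (i, j) then (("bola-s1", "S1") : String × String)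
     else if pvS2Lit.contains (i, j) then ("bola-s2", "S2")
     else if pvS3Lit.contains (i, j) then ("bola-s3", "S3")
     else ("bola-s1", "?"))
  = (if 1 ≤ i ∧ j ≤ 25 then
       (let k := (i - 1) * 26 - PySem.Int.floordiv ((i - 1) * i) 2 + (j - i)
        let r := PySem.Int.mod k 3
        if r == 0 then (("bola-s1", "S1") : String × String)
        else if r == 1 then ("bola-s2", "S2")
        else ("bola-s3", "S3"))
     else ("bola-s1", "?")) := by
  by_cases h : 1 ≤ i ∧ j ≤ 25
  · rw [if_pos h]
    exact pvInRange i (Finset.mem_Icc.mpr ⟨h.1, le_trans hij h.2⟩)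
      j (Finset.mem_Icc.mpr ⟨hij, h.2⟩)
  · rw [if_neg h]
    have m1 : ¬ (pvS1Lit.contains (i, j) = true) := by
      rw [List.contains_iff_mem]; intro hm
      exact h ⟨(pvS1Bound _ hm).1, (pvS1Bound _ hm).2⟩
    have m2 : ¬ (pvS2Lit.contains (i, j) = true) := by
      rw [List.contains_iff_mem]; intro hm
      exact h ⟨(pvS2Bound _ hm).1, (pvS2Bound _ hm).2⟩
    have m3 : ¬ (pvS3Lit.contains (i, j) = true) := by
      rw [List.contains_iff_mem]; intro hm
      exact h ⟨(pvS3Bound _ hm).1, (pvS3Bound _ hm).2⟩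
    rw [if_neg m1, if_neg m2, if_neg m3]

-- string plumbing
lemma pvJoinCons (x : String) (xs : List String) :
    PySem.Str.join "" (x :: xs) = x ++ PySem.Str.join "" xs := by
  apply String.toList_inj.mp
  cases xs with
  | nil => simp [PySem.Str.toList_join, String.toList_append, PySem.Chars.join_singleton,
      PySem.Chars.join_nil]
  | cons y ys =>
      simp [PySem.Str.toList_join, String.toList_append, PySem.Chars.join_cons_cons]

lemma pvJoinAppendSingleton (xs : List String) (y : String) :
    PySem.Str.join "" (xs ++ [y]) = PySem.Str.join "" xs ++ y := by
  induction xs with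
  | nil =>
      apply String.toList_inj.mp
      simp [PySem.Str.toList_join, String.toList_append, PySem.Chars.join_singleton,
        PySem.Chars.join_nil]
  | cons x xs ih =>
      rw [List.cons_append, pvJoinCons, pvJoinCons, ih]
      apply String.toList_inj.mp
      simp [String.toList_append]

lemma pvFoldlStr {α : Type} (g : α → String) (L : List α) (s : String) :
    L.foldl (fun h d => h ++ g d) s = s ++ PySem.Str.join "" (L.map g) := by
  induction L generalizing s with
  | nil =>
      apply String.toList_inj.mp
      simp [PySem.Str.toList_join, String.toList_append, PySem.Chars.join_nil]
  | cons x xs ih =>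
      simp only [List.foldl, List.map]
      rw [ih, pvJoinCons]
      apply String.toList_inj.mp
      simp [String.toList_append]

-- ===== VERDICT (by name: the statement is the Claim_ definition above) =====
theorem gerar_bolinhas_recentes_duque_spec : Claim_equal_gerar_bolinhas_recentes_duque := by
  intro historico _
  unfold Spec_gerar_bolinhas_recentes_duque
  unfold gerar_bolinhas_recentes_duque gerar_bolinhas_recentes_duque_alt
  simp only [pvMapa1, pvMapa2, pvMapa3]
  rw [PySem.List.foldl_append_singleton_eq_map, pvFoldlStr]
  simp only [List.cons_append, List.nil_append]
  rw [pvJoinCons, pvJoinAppendSingleton]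
  rw [List.map_congr_left (l := (PySem.List.slice historico (some (-12)) none).reverse)
    (g := fun d : Int × Int =>
      "<div class='" ++
        (if 1 ≤ min d.1 d.2 ∧ max d.1 d.2 ≤ 25 then
          (let k := (min d.1 d.2 - 1) * 26
              - PySem.Int.floordiv ((min d.1 d.2 - 1) * min d.1 d.2) 2
              + (max d.1 d.2 - min d.1 d.2)
           let r := PySem.Int.mod k 3
           if r == 0 then (("bola-s1", "S1") : String × String)
           else if r == 1 then ("bola-s2", "S2")
           else ("bola-s3", "S3"))
         else ("bola-s1", "?")).1 ++ "'>" ++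
        (if 1 ≤ min d.1 d.2 ∧ max d.1 d.2 ≤ 25 then
          (let k := (min d.1 d.2 - 1) * 26
              - PySem.Int.floordiv ((min d.1 d.2 - 1) * min d.1 d.2) 2
              + (max d.1 d.2 - min d.1 d.2)
           let r := PySem.Int.mod k 3
           if r == 0 then (("bola-s1", "S1") : String × String)
           else if r == 1 then ("bola-s2", "S2")
           else ("bola-s3", "S3"))
         else ("bola-s1", "?")).2 ++ "</div>")
    (by
      intro d _
      have hds : (if d.1 ≤ d.2 then (d.1, d.2) else (d.2, d.1))
          = (min d.1 d.2, max d.1 d.2) := by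
        by_cases hab : d.1 ≤ d.2
        · simp [hab]
        · have hba : d.2 ≤ d.1 := le_of_not_ge hab
          simp [hab, min_eq_right hba, max_eq_left hba]
      rw [hds, pvClassEqCore (min d.1 d.2) (max d.1 d.2) min_le_max])]
  apply String.toList_inj.mp
  simp [String.toList_append]
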